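-- pv_equiv track=rewrite | github.com/Jaynenyhan/ca1 | ca117/exam/crossword_142.py | crossword
-- ===== SOURCE A (Python) =====
-- def crossword(word_a, word_b):
--     world = generate_world(word_a, word_b)
--     pos_a, pos_b = common_char(word_a, word_b)
--     # put word a in correct pos
--     for i in range(0, len(word_a)):
--         world[pos_b][i] = word_a[i]
--     # put word b in correct pos
--     for i in range(0, len(word_b)):
--         world[i][pos_a] = word_b[i]
--     # prepare world for printing
--     lines = [''.join(line) for line in world]
--     return '\n'.join(lines)
--
-- def generate_world(word_a, word_b):
--     world = []
--     for i in range(0, len(word_b)):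
--         world.append(['.'] * len(word_a))
--     return world
--
-- def common_char(s, t):
--     i = 0
--     while s[i] not in t:
--         i += 1
--     j = 0
--     while t[j] != s[i]:
--         j += 1
--     return i, j
-- ===== SOURCE B (Python) =====
-- def crossword(word_a, word_b):
--     # same first-match scan as A (raises IndexError when no shared char)
--     i = 0
--     while word_a[i] not in word_b:
--         i += 1
--     pos_a = i
--     pos_b = word_b.index(word_a[pos_a])
--     rows = []
--     for r in range(len(word_b)):
--         if r == pos_b:
--             rows.append(word_a)
--         else:
--             rows.append('.' * pos_a + word_b[r] + '.' * (len(word_a) - pos_a - 1))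
--     return '\n'.join(rows)
-- ===== Notes on version B (the rewrite author's own statement) =====
-- stated objective: simpler
-- what changed: B never builds the mutable 2D grid: it emits each output row directly (word_a on the crossing row, dots plus one letter elsewhere) in a single loop, instead of generate_world plus two overwrite loops plus a join pass.
-- outside the precondition, e.g. on crossword('ab', 'cd'): A raises IndexError, B raises IndexError
import Mathlib
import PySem

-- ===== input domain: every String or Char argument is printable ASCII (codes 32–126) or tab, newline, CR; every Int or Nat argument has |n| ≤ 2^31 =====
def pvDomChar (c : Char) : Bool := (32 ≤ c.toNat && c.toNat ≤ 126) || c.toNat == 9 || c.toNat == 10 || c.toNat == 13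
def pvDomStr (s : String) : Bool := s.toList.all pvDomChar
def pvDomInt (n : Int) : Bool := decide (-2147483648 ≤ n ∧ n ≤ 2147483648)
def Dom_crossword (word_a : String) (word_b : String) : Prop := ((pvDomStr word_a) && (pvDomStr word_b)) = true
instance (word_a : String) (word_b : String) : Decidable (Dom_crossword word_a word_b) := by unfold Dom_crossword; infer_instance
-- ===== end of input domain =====

-- B builds each output row directly (word_a on the crossing row, dots plus one letter elsewhere) instead of mutating a 2D grid; objective: simpler.


-- ===== PORT A =====
-- while s[i] not in t: i += 1   (none = IndexError when the scan runs off the end)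
def pvScanA (t : List Char) : List Char → Nat → Option (Nat × Char)
  | [], _ => none
  | c :: rest, i => if c ∈ t then some (i, c) else pvScanA t rest (i + 1)

-- while t[j] != c: j += 1   (none = IndexError)
def pvScanB (c : Char) : List Char → Nat → Option Nat
  | [], _ => none
  | d :: rest, j => if d = c then some j else pvScanB c rest (j + 1)

def crossword (word_a : String) (word_b : String) : String :=
  let la := word_a.toList
  let lb := word_b.toList
  -- world = generate_world(word_a, word_b)
  let world := List.replicate lb.length (List.replicate la.length '.')
  match pvScanA lb la 0 with
  | none => ""            -- Python raises IndexError here; excluded by Pre_crossword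
  | some (pa, c) =>
    match pvScanB c lb 0 with
    | none => ""          -- unreachable (c ∈ lb); Python would raise IndexError
    | some pb =>
      -- for i in range(0, len(word_a)): world[pos_b][i] = word_a[i]
      let world := (List.range la.length).foldl
        (fun w i => w.modify pb (fun row => row.set i (la.getD i ' '))) world
      -- for i in range(0, len(word_b)): world[i][pos_a] = word_b[i]
      let world := (List.range lb.length).foldl
        (fun w i => w.modify i (fun row => row.set pa (lb.getD i ' '))) world
      String.intercalate "\n" (world.map (fun line => String.mk line))

-- ===== PORT B =====
def crossword_alt (word_a : String) (word_b : String) : String :=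
  let la := word_a.toList
  let lb := word_b.toList
  match pvScanA lb la 0 with   -- B keeps A's first while loop verbatim
  | none => ""                 -- IndexError, excluded by Pre_crossword
  | some (pa, c) =>
    match PySem.List.index? lb c with   -- word_b.index(word_a[pos_a])
    | none => ""                        -- unreachable ValueError
    | some pb =>
      let rows := (List.range lb.length).map (fun r =>
        if r = pb then la
        else List.replicate pa '.' ++ lb.getD r ' ' :: List.replicate (la.length - pa - 1) '.')
      String.intercalate "\n" (rows.map (fun line => String.mk line))

-- ===== PRECONDITION & SPEC =====
-- Pre_ excludes exactly the inputs where common_char's scan runs off word_a (no character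
-- of word_a occurs in word_b, including empty words): Python A (and B) raise IndexError there.
def Pre_crossword (word_a : String) (word_b : String) : Prop :=
  (word_a.toList.any (fun c => word_b.toList.contains c)) = true
instance (word_a : String) (word_b : String) : Decidable (Pre_crossword word_a word_b) := by
  unfold Pre_crossword; infer_instance

def pvWitness_crossword : String × String := ("a", "a")

def Spec_crossword (word_a : String) (word_b : String) (out : String) : Prop := out = crossword_alt word_a word_b
instance (word_a : String) (word_b : String) (out : String) : Decidable (Spec_crossword word_a word_b out) := by unfold Spec_crossword; infer_instance

-- ===== CLAIM (what is proved, stated in full; the proofs are below) =====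
def Claim_equal_crossword : Prop := ∀ (word_a : String) (word_b : String), Dom_crossword word_a word_b → Pre_crossword word_a word_b → Spec_crossword word_a word_b (crossword word_a word_b)

-- ===== LEMMAS AND PROOFS =====

-- pvScanA succeeds when some char of s lies in t
theorem pvScanA_isSome (t s : List Char) (i : Nat) (h : ∃ c ∈ s, c ∈ t) :
    ∃ p c, pvScanA t s i = some (p, c) := by
  induction s generalizing i with
  | nil => rcases h with ⟨c, hc, _⟩; cases hc
  | cons a rest ih =>
    by_cases ha : a ∈ t
    · exact ⟨i, a, by simp [pvScanA, ha]⟩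
    · rcases h with ⟨c, hc, hct⟩
      rcases List.mem_cons.mp hc with rfl | hc'
      · exact absurd hct ha
      · rcases ih (i + 1) ⟨c, hc', hct⟩ with ⟨p, c', hpc⟩
        exact ⟨p, c', by simp [pvScanA, ha, hpc]⟩

-- properties of a successful pvScanA with start index 0
theorem pvScanA_spec (t s : List Char) (p : Nat) (c : Char)
    (h : pvScanA t s 0 = some (p, c)) :
    p < s.length ∧ s.getD p ' ' = c ∧ c ∈ t := by
  suffices H : ∀ (i p : Nat), pvScanA t s i = some (p, c) →
      i ≤ p ∧ p - i < s.length ∧ s.getD (p - i) ' ' = c ∧ c ∈ t by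
    rcases H 0 p h with ⟨_, h1, h2, h3⟩
    simpa using ⟨h1, h2, h3⟩
  clear h
  induction s with
  | nil => intro i p h; simp [pvScanA] at h
  | cons a rest ih =>
    intro i p h
    simp only [pvScanA] at h
    split_ifs at h with ha
    · simp only [Option.some.injEq, Prod.mk.injEq] at h
      rcases h with ⟨rfl, rfl⟩
      exact ⟨le_refl _, by simp, by simp, ha⟩
    · rcases ih (i + 1) p h with ⟨hle, hlt, hget, hmem⟩
      refine ⟨by omega, by simp; omega, ?_, hmem⟩
      have : p - i = (p - (i + 1)) + 1 := by omega
      rw [this, List.getD_cons_succ, hget]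

-- pvScanB computes the first index of c, i.e. PySem.List.index?
theorem pvScanB_shift (c : Char) (t : List Char) (j : Nat) :
    pvScanB c t j = (t.idxOf? c).map (· + j) := by
  induction t generalizing j with
  | nil => simp [pvScanB]
  | cons d rest ih =>
    by_cases hd : d = c
    · simp [pvScanB, hd, List.idxOf?_cons]
    · simp only [pvScanB, hd, if_false, ih (j + 1), List.idxOf?_cons,
        beq_iff_eq, if_neg hd, Option.map_map]
      congr 1
      funext k
      simp [Function.comp]
      omega

theorem pvScanB_eq_index? (c : Char) (t : List Char) :
    pvScanB c t 0 = PySem.List.index? t c := by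
  rw [pvScanB_shift, PySem.List.index?_eq_idxOf?]
  simp

-- set on replicate '.' splits into dots ++ char ++ dots
theorem set_replicate_dot (n p : Nat) (hp : p < n) (x : Char) :
    (List.replicate n '.').set p x
      = List.replicate p '.' ++ x :: List.replicate (n - p - 1) '.' := by
  induction p generalizing n with
  | zero => cases n with
    | zero => omega
    | succ n => simp [List.replicate_succ]
  | succ p ih => cases n with
    | zero => omega
    | succ n =>
      simp [List.replicate_succ, List.set]
      exact ih n (by omega)

-- first loop row: setting every entry of a length-n row to la's entries yields la
theorem foldl_set_row_aux (la : List Char) (row : List Char) (hlen : row.length = la.length)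
    (k : Nat) (hk : k ≤ la.length) :
    (List.range k).foldl (fun r i => r.set i (la.getD i ' ')) row
      = la.take k ++ row.drop k := by
  induction k with
  | zero => simp
  | succ k ih =>
    rw [List.range_succ, List.foldl_append, ih (by omega)]
    simp only [List.foldl_cons, List.foldl_nil]
    have hk' : k < la.length := by omega
    have hrow : k < row.length := by omega
    rw [List.drop_eq_getElem_cons hrow]
    rw [List.set_append_right _ _ (by rw [List.length_take]; omega)]
    have hlt : k - (la.take k).length = 0 := by rw [List.length_take]; omega
    rw [hlt, List.set_cons_zero]
    have hgd : la.getD k ' ' = la[k] := by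
      simp [List.getD_eq_getElem?_getD, List.getElem?_eq_getElem hk']
    have htk : List.take (k + 1) la = List.take k la ++ [la[k]] := by
      rw [List.take_succ, List.getElem?_eq_getElem hk']
      rfl
    rw [hgd, htk, List.append_assoc, List.singleton_append]

theorem foldl_set_row (la : List Char) (row : List Char) (hlen : row.length = la.length) :
    (List.range la.length).foldl (fun r i => r.set i (la.getD i ' ')) row = la := by
  rw [foldl_set_row_aux la row hlen la.length (le_refl _)]
  simp [← hlen]

-- first overwrite loop: all modifications hit the same row pb
theorem foldl_modify_const (g : Nat → List Char → List Char) (pb : Nat)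
    (k : Nat) (w : List (List Char)) :
    (List.range k).foldl (fun w i => w.modify pb (g i)) w
      = w.modify pb (fun row => (List.range k).foldl (fun r i => g i r) row) := by
  induction k with
  | zero =>
    simp only [List.range_zero, List.foldl_nil]
    apply List.ext_getElem (by simp [List.length_modify])
    intro i h1 h2
    rw [List.getElem_modify]
    split <;> rfl
  | succ k ih =>
    simp only [List.range_succ, List.foldl_append, List.foldl_cons, List.foldl_nil, ih,
      List.modify_modify_eq, Function.comp]
    rfl

-- second overwrite loop: iteration i touches only row i
theorem getElem?_foldl_modify_diag (f : Nat → List Char → List Char)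
    (m : Nat) (w : List (List Char)) (j : Nat) (hj : j < w.length) :
    ((List.range m).foldl (fun w i => w.modify i (f i)) w)[j]?
      = some (if j < m then f j (w[j]'hj) else w[j]'hj) := by
  induction m with
  | zero => simp [List.getElem?_eq_getElem hj]
  | succ m ih =>
    rw [List.range_succ, List.foldl_append]
    simp only [List.foldl_cons, List.foldl_nil]
    rw [List.getElem?_modify, ih]
    by_cases hm : m = j
    · subst hm
      simp
    · by_cases hjm : j < m
      · have h2 : j < m + 1 := by omega
        simp [hm, hjm, h2]
      · have h2 : ¬ j < m + 1 := by omega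
        simp [hm, hjm, h2]

theorem len_foldl_modify_diag (f : Nat → List Char → List Char)
    (m : Nat) (w : List (List Char)) :
    ((List.range m).foldl (fun w i => w.modify i (f i)) w).length = w.length := by
  induction m with
  | zero => simp
  | succ m ih => rw [List.range_succ, List.foldl_append]; simp [List.length_modify, ih]

-- the grid after the first overwrite loop, row by row
theorem world1_getElem (la lb : List Char) (pb : Nat) (j : Nat) (hj : j < lb.length)
    (h2 : j < (((List.replicate lb.length (List.replicate la.length '.')).modify pb
      (fun row => (List.range la.length).foldl (fun r i => r.set i (la.getD i ' ')) row))).length) :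
    (((List.replicate lb.length (List.replicate la.length '.')).modify pb
      (fun row => (List.range la.length).foldl (fun r i => r.set i (la.getD i ' ')) row))[j]'h2)
      = if j = pb then la else List.replicate la.length '.' := by
  rw [List.getElem_modify]
  by_cases h : pb = j
  · subst h
    simp only [if_pos rfl, List.getElem_replicate]
    rw [foldl_set_row la _ (by simp)]
  · rw [if_neg h, if_neg (fun hh => h hh.symm), List.getElem_replicate]

-- the two row lists coincide entrywise
theorem rows_eq (la lb : List Char) (pa pb : Nat)
    (hpa : pa < la.length) (hpb : pb < lb.length)
    (hcc : la[pa]'hpa = lb[pb]'hpb) :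
    (List.range lb.length).foldl
        (fun w i => w.modify i (fun row => row.set pa (lb.getD i ' ')))
        ((List.range la.length).foldl
          (fun w i => w.modify pb (fun row => row.set i (la.getD i ' ')))
          (List.replicate lb.length (List.replicate la.length '.')))
      = (List.range lb.length).map (fun r =>
          if r = pb then la
          else List.replicate pa '.' ++ lb.getD r ' ' :: List.replicate (la.length - pa - 1) '.') := by
  rw [foldl_modify_const]
  have hw1len : (((List.replicate lb.length (List.replicate la.length '.')).modify pb
      (fun row => (List.range la.length).foldl (fun r i => r.set i (la.getD i ' ')) row))).length
      = lb.length := by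
    simp [List.length_modify]
  apply List.ext_getElem?
  intro j
  by_cases hj : j < lb.length
  · rw [getElem?_foldl_modify_diag _ _ _ j (by omega)]
    rw [List.getElem?_map, List.getElem?_range hj]
    simp only [Option.map_some, Option.some.injEq, if_pos hj]
    rw [world1_getElem la lb pb j hj]
    by_cases hjp : j = pb
    · subst hjp
      rw [if_pos rfl, if_pos rfl]
      have : lb.getD j ' ' = la[pa]'hpa := by
        rw [hcc]
        simp [List.getD_eq_getElem?_getD, List.getElem?_eq_getElem hpb]
      rw [this, List.set_getElem_self]
    · rw [if_neg hjp, if_neg hjp]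
      exact set_replicate_dot la.length pa hpa (lb.getD j ' ')
  · rw [List.getElem?_eq_none_iff.mpr (by rw [len_foldl_modify_diag, hw1len]; omega),
      List.getElem?_eq_none_iff.mpr (by simp; omega)]

-- ===== VERDICT =====
theorem crossword_spec : Claim_equal_crossword := by
  intro wa wb _dom hpre
  unfold Spec_crossword crossword crossword_alt
  have hpre' : ∃ c ∈ wa.toList, c ∈ wb.toList := by
    unfold Pre_crossword at hpre
    simpa using hpre
  obtain ⟨pa, c, hA⟩ := pvScanA_isSome wb.toList wa.toList 0 hpre'
  obtain ⟨hpa, hgd, hc⟩ := pvScanA_spec wb.toList wa.toList pa c hA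
  obtain ⟨pb, hidx⟩ := Option.isSome_iff_exists.mp
    ((PySem.List.index?_isSome_iff _ _).mpr hc)
  obtain ⟨hpb, hcb, _⟩ := PySem.List.getElem_of_index?_eq_some hidx
  have hB : pvScanB c wb.toList 0 = some pb := by rw [pvScanB_eq_index?, hidx]
  simp only [hA, hB, hidx]
  congr 1
  congr 1
  apply rows_eq wa.toList wb.toList pa pb hpa hpb
  rw [hcb]
  rw [← hgd]
  simp [List.getD_eq_getElem?_getD, List.getElem?_eq_getElem hpa]
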